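-- pv_equiv track=rewrite | github.com/marselnikolli/repo-deployer-v2 | backend/services/repository_scanner.py | _extract_instructions_from_readme
-- ===== SOURCE A (Python) =====
-- from typing import Dict, Any, List, Optional
--
-- def _extract_instructions_from_readme(readme_content: str) -> List[str]:
--     """Extract deployment instructions from README content"""
--     instructions = []
--
--     if not readme_content:
--         return instructions
--
--     # Split by lines for processing
--     lines = readme_content.split('\n')
--
--     # Find sections that contain deployment/installation instructions
--     current_section = None
--     section_content = []
--
--     for line in lines:
--         # Check for section headers
--         lower_line = line.lower()
--
--         # Check if this is a header containing deployment-related keywords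
--         is_deployment_header = any(
--             keyword in lower_line for keyword in
--             ['install', 'setup', 'deploy', 'run', 'usage', 'getting started', 'configuration', 'docker', 'build']
--         )
--
--         if line.startswith('#') and is_deployment_header:
--             # Save previous section if exists
--             if section_content:
--                 instructions.extend(section_content)
--                 section_content = []
--
--             current_section = line.strip('# ').strip()
--             section_content.append(f"### {current_section}")
--
--         elif current_section and section_content:
--             # Add lines to current section until next header
--             if not line.startswith('#'):
--                 section_content.append(line)
--             else:
--                 # Check if new section is also deployment-related
--                 if not any(keyword in line.lower() for keyword in ['install', 'setup', 'deploy', 'run', 'usage', 'getting started', 'configuration', 'docker', 'build']):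
--                     instructions.extend(section_content)
--                     section_content = []
--                     current_section = None
--
--     # Add remaining section
--     if section_content:
--         instructions.extend(section_content)
--
--     # Clean up and filter out empty lines
--     cleaned_instructions = []
--     for instruction in instructions:
--         if instruction.strip():
--             cleaned_instructions.append(instruction)
--
--     return cleaned_instructions
-- ===== SOURCE B (Python) =====
-- from typing import List
--
-- _KEYWORDS = ['install', 'setup', 'deploy', 'run', 'usage', 'getting started',
--              'configuration', 'docker', 'build']
--
--
-- def _extract_instructions_from_readme(readme_content: str) -> List[str]:
--     """Extract deployment instructions from README content (index-scan version)."""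
--     if not readme_content:
--         return []
--     lines = readme_content.split('\n')
--     out = []
--     i, n = 0, len(lines)
--     while i < n:
--         line = lines[i]
--         i += 1
--         if line.startswith('#') and any(k in line.lower() for k in _KEYWORDS):
--             out.append('### ' + line.strip('# ').strip())
--             while i < n and not lines[i].startswith('#'):
--                 out.append(lines[i])
--                 i += 1
--     return [x for x in out if x.strip()]
-- ===== Notes on version B (the rewrite author's own statement) =====
-- stated objective: simpler
-- what changed: Replaced the current_section/section_content state machine with deferred flushes by a direct index scan: at each deployment header emit the transformed title and then consume body lines up to the next header, filtering blanks at the end.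
import Mathlib
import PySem

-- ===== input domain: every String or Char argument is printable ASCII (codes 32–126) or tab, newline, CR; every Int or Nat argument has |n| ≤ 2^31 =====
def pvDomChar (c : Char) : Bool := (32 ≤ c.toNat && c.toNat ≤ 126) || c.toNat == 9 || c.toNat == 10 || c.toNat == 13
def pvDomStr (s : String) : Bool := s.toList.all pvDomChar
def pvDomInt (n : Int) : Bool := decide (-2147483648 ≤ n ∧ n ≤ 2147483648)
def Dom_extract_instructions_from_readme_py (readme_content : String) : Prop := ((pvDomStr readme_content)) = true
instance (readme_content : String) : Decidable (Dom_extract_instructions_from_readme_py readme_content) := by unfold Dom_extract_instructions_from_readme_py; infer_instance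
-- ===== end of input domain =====

-- B replaces A's current_section/section_content state machine (with deferred flushes)
-- by a direct scan that, at each deployment header, emits the title and consumes the
-- body up to the next header; objective: simpler.

-- Shared text in both Pythons: the keyword list and the per-line tests.
def pvKeywords : List String :=
  ["install", "setup", "deploy", "run", "usage", "getting started", "configuration", "docker", "build"]

-- keyword in line.lower() for some keyword
def pvIsDep (line : String) : Bool :=
  pvKeywords.any (fun k => PySem.Str.isIn k (PySem.Str.lower line))

-- line.startswith('#')
def pvIsHdr (line : String) : Bool := PySem.Str.startswith line "#"

-- line.strip('# ').strip()
def pvTitle (line : String) : String := PySem.Str.strip (PySem.Str.stripChars line "# ")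

-- ===== PORT A =====
-- state = (instructions, current_section, section_content)
def pvAStep (st : List String × Option String × List String) (line : String) :
    List String × Option String × List String :=
  match st with
  | (instr, cur, content) =>
    if pvIsHdr line && pvIsDep line then
      let instr' := if !content.isEmpty then instr ++ content else instr
      let t := pvTitle line
      (instr', some t, ["### " ++ t])
    else if cur.isSome && !content.isEmpty then
      if !pvIsHdr line then (instr, cur, content ++ [line])
      else if !pvIsDep line then (instr ++ content, none, [])
      else (instr, cur, content)
    else (instr, cur, content)

def extract_instructions_from_readme_py (readme_content : String) : List String :=
  if readme_content = "" then []
  else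
    let lines := (PySem.Str.split? readme_content "\n").getD []  -- sep "\n" ≠ "": always some
    let st := lines.foldl pvAStep ([], none, [])
    let instructions := if !st.2.2.isEmpty then st.1 ++ st.2.2 else st.1
    instructions.filter (fun x => PySem.Str.strip x ≠ "")

-- ===== PORT B =====
-- outer while loop of Source B: recursion on the remaining lines; the inner while loop
-- that consumes body lines up to the next header is takeWhile/dropWhile.
def pvBGo : List String → List String
  | [] => []
  | l :: rest =>
    if pvIsHdr l && pvIsDep l then
      ("### " ++ pvTitle l) ::
        (rest.takeWhile (fun x => !pvIsHdr x) ++ pvBGo (rest.dropWhile (fun x => !pvIsHdr x)))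
    else pvBGo rest
termination_by lines => lines.length
decreasing_by
  · simp only [List.length_cons]
    exact Nat.lt_succ_of_le (List.length_dropWhile_le _ rest)
  · simp

def extract_instructions_from_readme_py_alt (readme_content : String) : List String :=
  if readme_content = "" then []
  else
    (pvBGo ((PySem.Str.split? readme_content "\n").getD [])).filter
      (fun x => PySem.Str.strip x ≠ "")

-- ===== PRECONDITION & SPEC =====
def Spec_extract_instructions_from_readme_py (readme_content : String) (out : List String) : Prop := out = extract_instructions_from_readme_py_alt readme_content
instance (readme_content : String) (out : List String) : Decidable (Spec_extract_instructions_from_readme_py readme_content out) := by unfold Spec_extract_instructions_from_readme_py; infer_instance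

-- ===== CLAIM (what is proved, stated in full; the proofs are below) =====
def Claim_equal_extract_instructions_from_readme_py : Prop := ∀ (readme_content : String), Dom_extract_instructions_from_readme_py readme_content → Spec_extract_instructions_from_readme_py readme_content (extract_instructions_from_readme_py readme_content)

-- ===== LEMMAS AND PROOFS =====

-- final flush of A's loop state
def pvFinish (st : List String × Option String × List String) : List String :=
  if !st.2.2.isEmpty then st.1 ++ st.2.2 else st.1

theorem pvBGo_nil : pvBGo [] = [] := by rw [pvBGo.eq_def]

theorem pvBGo_cons (l : String) (rest : List String) :
    pvBGo (l :: rest) =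
      if pvIsHdr l && pvIsDep l then
        ("### " ++ pvTitle l) ::
          (rest.takeWhile (fun x => !pvIsHdr x) ++ pvBGo (rest.dropWhile (fun x => !pvIsHdr x)))
      else pvBGo rest := by
  rw [pvBGo.eq_def]

-- A's loop from the idle state produces acc ++ pvBGo lines, and from an active
-- section state it produces the pending content, the body up to the next header,
-- and then continues as pvBGo from that header.
theorem pvLoop_eq (lines : List String) :
    (∀ acc, pvFinish (lines.foldl pvAStep (acc, none, [])) = acc ++ pvBGo lines) ∧
    (∀ acc content s, content ≠ [] →
      pvFinish (lines.foldl pvAStep (acc, some s, content)) =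
        acc ++ content ++ lines.takeWhile (fun x => !pvIsHdr x) ++
          pvBGo (lines.dropWhile (fun x => !pvIsHdr x))) := by
  induction lines with
  | nil =>
    refine ⟨fun acc => by simp [pvFinish, pvBGo_nil], fun acc content s hc => ?_⟩
    simp [pvFinish, hc, pvBGo_nil]
  | cons l rest ih =>
    obtain ⟨ih1, ih2⟩ := ih
    constructor
    · intro acc
      by_cases h : (pvIsHdr l && pvIsDep l) = true
      · have hstep : List.foldl pvAStep (acc, none, []) (l :: rest) =
            List.foldl pvAStep (acc, some (pvTitle l), ["### " ++ pvTitle l]) rest := by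
          simp [pvAStep, h]
        rw [hstep, ih2 acc ["### " ++ pvTitle l] (pvTitle l) (by simp), pvBGo_cons]
        simp [h]
      · have hstep : List.foldl pvAStep (acc, none, []) (l :: rest) =
            List.foldl pvAStep (acc, none, []) rest := by
          simp [pvAStep, h]
        rw [hstep, ih1 acc, pvBGo_cons]
        simp [h]
    · intro acc content s hc
      have hcne : content.isEmpty = false := List.isEmpty_eq_false_iff.mpr hc
      by_cases h : (pvIsHdr l && pvIsDep l) = true
      · -- deployment header: previous section flushed, new section opened
        have hhdr : pvIsHdr l = true := by
          cases hh : pvIsHdr l <;> simp [hh] at h ⊢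
        have hstep : List.foldl pvAStep (acc, some s, content) (l :: rest) =
            List.foldl pvAStep (acc ++ content, some (pvTitle l), ["### " ++ pvTitle l]) rest := by
          simp [pvAStep, h, hcne]
        rw [hstep, ih2 (acc ++ content) ["### " ++ pvTitle l] (pvTitle l) (by simp)]
        have hdep : pvIsDep l = true := by
          cases hd : pvIsDep l <;> simp [hd] at h ⊢
        rw [List.takeWhile_cons, List.dropWhile_cons]
        simp [hhdr, hdep, pvBGo_cons]
      · by_cases hh : pvIsHdr l = true
        · -- non-deployment header: the section is flushed and closed
          have hd : pvIsDep l = false := by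
            cases hdd : pvIsDep l
            · rfl
            · simp [hh, hdd] at h
          have hstep : List.foldl pvAStep (acc, some s, content) (l :: rest) =
              List.foldl pvAStep (acc ++ content, none, []) rest := by
            simp [pvAStep, hh, hd, hcne]
          rw [hstep, ih1 (acc ++ content)]
          rw [List.takeWhile_cons, List.dropWhile_cons]
          simp [hh, hd, pvBGo_cons, List.append_assoc]
        · -- ordinary body line, appended to the section
          have hh' : pvIsHdr l = false := by cases hhh : pvIsHdr l <;> simp_all
          have hstep : List.foldl pvAStep (acc, some s, content) (l :: rest) =
              List.foldl pvAStep (acc, some s, content ++ [l]) rest := by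
            simp [pvAStep, hh', hcne]
          rw [hstep, ih2 acc (content ++ [l]) s (by simp)]
          rw [List.takeWhile_cons, List.dropWhile_cons]
          simp [hh', List.append_assoc]

-- ===== VERDICT (by name: the statement is the Claim_ definition above) =====
theorem extract_instructions_from_readme_py_spec : Claim_equal_extract_instructions_from_readme_py := by
  intro s _
  unfold Spec_extract_instructions_from_readme_py
  unfold extract_instructions_from_readme_py extract_instructions_from_readme_py_alt
  by_cases hs : s = ""
  · simp [hs]
  · simp only [if_neg hs]
    rw [show ∀ st, (if !st.2.2.isEmpty then st.1 ++ st.2.2 else st.1) = pvFinish st from fun _ => rfl]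
    rw [(pvLoop_eq _).1 []]
    simp
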